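-- pv_equiv track=rewrite | github.com/7ayLabs/7aychain | devnet/scripts/laud_crypto.py | _lagrange_basis_at_zero
-- ===== SOURCE A (Python) =====
-- RIJNDAEL_POLY = 0x11B
--
-- def gf256_mul(a, b):
--     """Multiply two bytes in GF(2^8) with Rijndael reduction."""
--     result = 0
--     a &= 0xFF
--     b &= 0xFF
--     while b:
--         if b & 1:
--             result ^= a
--         high_bit = a & 0x80
--         a = (a << 1) & 0xFF
--         if high_bit:
--             a ^= RIJNDAEL_POLY & 0xFF
--         b >>= 1
--     return result
--
-- def gf256_inv(a):
--     """Multiplicative inverse in GF(2^8). inv(0) = 0."""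
--     if a == 0:
--         return 0
--     result = a
--     for _ in range(6):
--         result = gf256_mul(result, result)
--         result = gf256_mul(result, a)
--     return gf256_mul(result, result)
--
-- def gf256_div(a, b):
--     """Divide a by b in GF(2^8). Returns None if b == 0."""
--     if b == 0:
--         return None
--     return gf256_mul(a, gf256_inv(b))
--
-- def _lagrange_basis_at_zero(shares, i, xi):
--     """Compute Lagrange basis polynomial at x=0 for share i.
--
--     Matches Rust compute_lagrange_basis_at_zero().
--     """
--     result = 1
--     for j, (xj, _) in enumerate(shares):
--         if i != j:
--             denom = xi ^ xj  # GF(2^8) subtraction is XOR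
--             if denom == 0:
--                 return None
--             div_result = gf256_div(xj, denom)
--             if div_result is None:
--                 return None
--             result = gf256_mul(result, div_result)
--     return result
-- ===== SOURCE B (Python) =====
-- RIJNDAEL_POLY = 0x11B
--
-- def gf256_mul(a, b):
--     """Multiply two bytes in GF(2^8) with Rijndael reduction."""
--     result = 0
--     a &= 0xFF
--     b &= 0xFF
--     while b:
--         if b & 1:
--             result ^= a
--         high_bit = a & 0x80
--         a = (a << 1) & 0xFF
--         if high_bit:
--             a ^= RIJNDAEL_POLY & 0xFF
--         b >>= 1
--     return result
--
-- def gf256_inv(a):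
--     """Multiplicative inverse in GF(2^8). inv(0) = 0."""
--     if a == 0:
--         return 0
--     result = a
--     for _ in range(6):
--         result = gf256_mul(result, result)
--         result = gf256_mul(result, a)
--     return gf256_mul(result, result)
--
-- def _lagrange_basis_at_zero(shares, i, xi):
--     """Compute Lagrange basis polynomial at x=0 for share i.
--
--     Accumulates the numerator and denominator products separately and
--     performs a single field inversion at the end (inv(0) = 0), instead
--     of one inversion per term.
--     """
--     num = 1
--     den = 1
--     for j, (xj, _) in enumerate(shares):
--         if i == j:
--             continue
--         denom = xi ^ xj  # GF(2^8) subtraction is XOR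
--         if denom == 0:
--             return None
--         num = gf256_mul(num, xj)
--         den = gf256_mul(den, denom)
--     return gf256_mul(num, gf256_inv(den))
-- ===== Notes on version B (the rewrite author's own statement) =====
-- stated objective: faster
-- what changed: B keeps two running products (numerator and denominator) over one loop and performs a single GF(2^8) inversion at the end, instead of A's per-term division (one 13-multiplication inversion per share).
import Mathlib
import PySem

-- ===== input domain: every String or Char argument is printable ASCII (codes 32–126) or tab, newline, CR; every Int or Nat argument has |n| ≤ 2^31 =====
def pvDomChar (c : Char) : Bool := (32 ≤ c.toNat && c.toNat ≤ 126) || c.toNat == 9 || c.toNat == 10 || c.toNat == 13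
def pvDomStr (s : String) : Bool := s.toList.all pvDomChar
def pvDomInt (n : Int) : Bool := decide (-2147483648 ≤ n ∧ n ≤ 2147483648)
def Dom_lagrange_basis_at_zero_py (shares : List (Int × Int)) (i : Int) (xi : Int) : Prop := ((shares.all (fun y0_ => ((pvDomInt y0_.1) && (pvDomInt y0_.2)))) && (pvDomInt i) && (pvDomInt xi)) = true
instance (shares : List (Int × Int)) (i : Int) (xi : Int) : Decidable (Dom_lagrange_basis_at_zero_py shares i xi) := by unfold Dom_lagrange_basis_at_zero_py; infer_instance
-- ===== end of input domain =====

-- B accumulates the numerator and denominator products in one loop and inverts once at the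
-- end (using the module's inv(0) = 0 convention), instead of A's per-term division.

-- ===== PORT A =====
-- the while-loop of gf256_mul; b & 0xFF < 256, so 8 halvings always reach b = 0 and the
-- fuel argument 8 makes the very same iteration total (fuel is never exhausted early)
def gmLoop : Nat → Nat → Nat → Nat → Nat
  | 0, _, _, result => result
  | fuel+1, b, a, result =>
    if b = 0 then result
    else
      let result := if b &&& 1 != 0 then result ^^^ a else result
      let high := a &&& 0x80
      let a := (a <<< 1) &&& 0xFF
      let a := if high != 0 then a ^^^ 0x1B else a
      gmLoop fuel (b >>> 1) a result

-- a & 0xFF and b & 0xFF are nonnegative, so the loop state lives in Nat (exact)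
def gf256_mul (a b : Int) : Int :=
  ((gmLoop 8 ((PySem.Int.band b 255).toNat) ((PySem.Int.band a 255).toNat) 0 : Nat) : Int)

def gf256_inv (a : Int) : Int :=
  if a = 0 then 0
  else
    let result := (List.range 6).foldl (fun result _ => gf256_mul (gf256_mul result result) a) a
    gf256_mul result result

def gf256_div (a b : Int) : Option Int :=
  if b = 0 then none else some (gf256_mul a (gf256_inv b))

def lagA : List (Int × Int) → Int → Int → Int → Int → Option Int
  | [], _, _, _, result => some result
  | (xj, _) :: rest, j, i, xi, result =>
    if i ≠ j then
      let denom := PySem.Int.bxor xi xj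
      if denom = 0 then none
      else
        match gf256_div xj denom with
        | none => none
        | some div_result => lagA rest (j+1) i xi (gf256_mul result div_result)
    else lagA rest (j+1) i xi result

def lagrange_basis_at_zero_py (shares : List (Int × Int)) (i : Int) (xi : Int) : Option Int :=
  lagA shares 0 i xi 1

-- ===== PORT B =====
def lagB : List (Int × Int) → Int → Int → Int → Int → Int → Option Int
  | [], _, _, _, num, den => some (gf256_mul num (gf256_inv den))
  | (xj, _) :: rest, j, i, xi, num, den =>
    if i = j then lagB rest (j+1) i xi num den
    else
      let denom := PySem.Int.bxor xi xj
      if denom = 0 then none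
      else lagB rest (j+1) i xi (gf256_mul num xj) (gf256_mul den denom)

def lagrange_basis_at_zero_py_alt (shares : List (Int × Int)) (i : Int) (xi : Int) : Option Int :=
  lagB shares 0 i xi 1 1

-- ===== PRECONDITION & SPEC =====
def Spec_lagrange_basis_at_zero_py (shares : List (Int × Int)) (i : Int) (xi : Int) (out : Option Int) : Prop := out = lagrange_basis_at_zero_py_alt shares i xi
instance (shares : List (Int × Int)) (i : Int) (xi : Int) (out : Option Int) : Decidable (Spec_lagrange_basis_at_zero_py shares i xi out) := by unfold Spec_lagrange_basis_at_zero_py; infer_instance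

-- ===== CLAIM (what is proved, stated in full; the proofs are below) =====
def Claim_equal_lagrange_basis_at_zero_py : Prop := ∀ (shares : List (Int × Int)) (i : Int) (xi : Int), Dom_lagrange_basis_at_zero_py shares i xi → Spec_lagrange_basis_at_zero_py shares i xi (lagrange_basis_at_zero_py shares i xi)

-- ===== LEMMAS AND PROOFS =====

-- Nat-level views of the field operations (proof helpers)
def mulN (a b : Nat) : Nat := gmLoop 8 (b &&& 255) (a &&& 255) 0
def invN (a : Nat) : Nat :=
  let r := (List.range 6).foldl (fun r _ => mulN (mulN r r) a) a
  mulN r r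
def toByte (a : Int) : Nat := (PySem.Int.band a 255).toNat
-- the per-iteration update of the multiplier ("xtime")
def xtN (a : Nat) : Nat := if a &&& 0x80 != 0 then ((a <<< 1) &&& 0xFF) ^^^ 0x1B else (a <<< 1) &&& 0xFF

theorem gmLoop_zero_b (fuel a r : Nat) : gmLoop fuel 0 a r = r := by
  cases fuel <;> simp [gmLoop]

theorem gmLoop_succ (fuel b a r : Nat) (hb : b ≠ 0) :
    gmLoop (fuel+1) b a r = gmLoop fuel (b >>> 1) (xtN a) (if b &&& 1 != 0 then r ^^^ a else r) := by
  simp [gmLoop, xtN, hb]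

theorem xor_lt_256 {x y : Nat} (hx : x < 256) (hy : y < 256) : x ^^^ y < 256 := by
  have : x ^^^ y < 2 ^ 8 := Nat.xor_lt_two_pow (by omega) (by omega)
  omega

theorem xtN_lt (a : Nat) : xtN a < 256 := by
  unfold xtN
  split
  · exact xor_lt_256 (by have := Nat.and_le_right (n := a <<< 1) (m := 255); omega) (by omega)
  · have := Nat.and_le_right (n := a <<< 1) (m := 255); omega

theorem gmLoop_lt (fuel : Nat) : ∀ b a r : Nat, a < 256 → r < 256 → gmLoop fuel b a r < 256 := by
  induction fuel with
  | zero => intro b a r _ hr; simpa [gmLoop] using hr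
  | succ fuel ih =>
    intro b a r ha hr
    by_cases hb : b = 0
    · simpa [hb, gmLoop_zero_b] using hr
    · rw [gmLoop_succ _ _ _ _ hb]
      refine ih _ _ _ (xtN_lt a) ?_
      split
      · exact xor_lt_256 hr ha
      · exact hr

theorem mulN_lt (a b : Nat) : mulN a b < 256 := by
  unfold mulN
  exact gmLoop_lt _ _ _ _ (by have := Nat.and_le_right (n := a) (m := 255); omega) (by omega)

set_option maxRecDepth 8192 in
theorem mask_lt : ∀ m : Nat, m < 256 → m &&& 255 = m := by decide

-- accumulator splits off as an xor
theorem gmLoop_acc (fuel : Nat) : ∀ b a r : Nat, gmLoop fuel b a r = r ^^^ gmLoop fuel b a 0 := by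
  induction fuel with
  | zero => intro b a r; simp [gmLoop]
  | succ fuel ih =>
    intro b a r
    by_cases hb : b = 0
    · simp [hb, gmLoop_zero_b]
    · rw [gmLoop_succ _ _ _ _ hb, gmLoop_succ _ _ _ 0 hb]
      rw [ih _ _ (if b &&& 1 != 0 then r ^^^ a else r), ih _ _ (if b &&& 1 != 0 then 0 ^^^ a else 0)]
      split <;> simp [Nat.xor_assoc]

theorem shl1_xor (a b : Nat) : (a ^^^ b) <<< 1 = (a <<< 1) ^^^ (b <<< 1) := by
  apply Nat.eq_of_testBit_eq
  intro i
  simp [Nat.testBit_shiftLeft, Nat.testBit_xor, Bool.and_xor_distrib_left]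

theorem shr1_xor (a b : Nat) : (a ^^^ b) >>> 1 = (a >>> 1) ^^^ (b >>> 1) := by
  apply Nat.eq_of_testBit_eq
  intro i
  simp [Nat.testBit_shiftRight, Nat.testBit_xor]

theorem and128_dichot (a : Nat) : a &&& 128 = 0 ∨ a &&& 128 = 128 := by
  rcases h : a.testBit 7 with _ | _
  · left
    apply Nat.eq_of_testBit_eq
    intro i
    rw [Nat.testBit_and, (show (128:Nat) = 2^7 by norm_num), Nat.testBit_two_pow]
    by_cases hi : i = 7
    · subst hi; simp [h]
    · simp [Ne.symm hi]
  · right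
    apply Nat.eq_of_testBit_eq
    intro i
    rw [Nat.testBit_and]
    conv_lhs => rw [(show (128:Nat) = 2^7 by norm_num), Nat.testBit_two_pow]
    conv_rhs => rw [(show (128:Nat) = 2^7 by norm_num), Nat.testBit_two_pow]
    by_cases hi : i = 7
    · subst hi; simp [h]
    · simp [Ne.symm hi]

theorem xtN_xor (a b : Nat) : xtN (a ^^^ b) = xtN a ^^^ xtN b := by
  unfold xtN
  rw [Nat.and_xor_distrib_right (a := a) (b := b) (c := 128),
      shl1_xor, Nat.and_xor_distrib_right (a := a <<< 1) (b := b <<< 1) (c := 255)]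
  rcases and128_dichot a with ha | ha <;> rcases and128_dichot b with hb | hb <;>
    rw [ha, hb] <;>
    simp [Nat.xor_assoc, Nat.xor_comm, Nat.xor_left_comm]

-- linearity in the multiplicand
theorem gmLoop_linA (fuel : Nat) :
    ∀ b a₁ a₂ r₁ r₂ : Nat,
      gmLoop fuel b (a₁ ^^^ a₂) (r₁ ^^^ r₂) = gmLoop fuel b a₁ r₁ ^^^ gmLoop fuel b a₂ r₂ := by
  induction fuel with
  | zero => intro b a₁ a₂ r₁ r₂; simp [gmLoop]
  | succ fuel ih =>
    intro b a₁ a₂ r₁ r₂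
    by_cases hb : b = 0
    · simp [hb, gmLoop_zero_b]
    · rw [gmLoop_succ _ _ _ _ hb, gmLoop_succ _ _ _ _ hb, gmLoop_succ _ _ _ _ hb, xtN_xor,
        ← ih]
      congr 1
      split
      · rw [Nat.xor_assoc, Nat.xor_comm r₂ (a₁ ^^^ a₂), Nat.xor_assoc, Nat.xor_comm a₂ r₂,
          ← Nat.xor_assoc, ← Nat.xor_assoc]
      · rfl

-- linearity in the multiplier
theorem gmLoop_linB (fuel : Nat) :
    ∀ b₁ b₂ a : Nat, gmLoop fuel (b₁ ^^^ b₂) a 0 = gmLoop fuel b₁ a 0 ^^^ gmLoop fuel b₂ a 0 := by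
  induction fuel with
  | zero => intro b₁ b₂ a; simp [gmLoop]
  | succ fuel ih =>
    intro b₁ b₂ a
    by_cases h1 : b₁ = 0
    · simp [h1, gmLoop_zero_b]
    by_cases h2 : b₂ = 0
    · simp [h2, gmLoop_zero_b]
    by_cases h12 : b₁ ^^^ b₂ = 0
    · have hbb : b₁ = b₂ := Nat.xor_eq_zero_iff.mp h12
      simp [h12, hbb, gmLoop_zero_b]
    · rw [gmLoop_succ _ _ _ _ h12, gmLoop_succ _ _ _ _ h1, gmLoop_succ _ _ _ _ h2,
        gmLoop_acc _ _ _ (if (b₁ ^^^ b₂) &&& 1 != 0 then 0 ^^^ a else 0),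
        gmLoop_acc _ _ _ (if b₁ &&& 1 != 0 then 0 ^^^ a else 0),
        gmLoop_acc _ _ _ (if b₂ &&& 1 != 0 then 0 ^^^ a else 0),
        shr1_xor, ih]
      have hbit : (b₁ ^^^ b₂) &&& 1 = (b₁ &&& 1) ^^^ (b₂ &&& 1) :=
        Nat.and_xor_distrib_right
      have d1 : b₁ &&& 1 = 0 ∨ b₁ &&& 1 = 1 := by rw [Nat.and_one_is_mod]; omega
      have d2 : b₂ &&& 1 = 0 ∨ b₂ &&& 1 = 1 := by rw [Nat.and_one_is_mod]; omega
      rcases d1 with e1 | e1 <;> rcases d2 with e2 | e2 <;>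
        simp [hbit, e1, e2, Nat.xor_assoc, Nat.xor_comm, Nat.xor_left_comm]

theorem mulN_linL (a₁ a₂ b : Nat) : mulN (a₁ ^^^ a₂) b = mulN a₁ b ^^^ mulN a₂ b := by
  unfold mulN
  rw [Nat.and_xor_distrib_right]
  have := gmLoop_linA 8 (b &&& 255) (a₁ &&& 255) (a₂ &&& 255) 0 0
  simpa using this

theorem mulN_linR (a b₁ b₂ : Nat) : mulN a (b₁ ^^^ b₂) = mulN a b₁ ^^^ mulN a b₂ := by
  unfold mulN
  rw [Nat.and_xor_distrib_right]
  exact gmLoop_linB 8 _ _ _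

theorem lin_zero (L : Nat → Nat) (h : ∀ x y, L (x ^^^ y) = L x ^^^ L y) : L 0 = 0 := by
  have h0 := h 0 0
  simp at h0
  exact h0

-- split off the top bit, per level (cheap finite checks)
set_option maxRecDepth 8192 in
theorem split128 : ∀ a, a < 256 → a = (a &&& 128) ^^^ (a &&& 127) ∧ a &&& 127 < 128 ∧ (a &&& 128 = 0 ∨ a &&& 128 = 128) := by decide
set_option maxRecDepth 8192 in
theorem split64 : ∀ a, a < 128 → a = (a &&& 64) ^^^ (a &&& 63) ∧ a &&& 63 < 64 ∧ (a &&& 64 = 0 ∨ a &&& 64 = 64) := by decide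
set_option maxRecDepth 8192 in
theorem split32 : ∀ a, a < 64 → a = (a &&& 32) ^^^ (a &&& 31) ∧ a &&& 31 < 32 ∧ (a &&& 32 = 0 ∨ a &&& 32 = 32) := by decide
set_option maxRecDepth 8192 in
theorem split16 : ∀ a, a < 32 → a = (a &&& 16) ^^^ (a &&& 15) ∧ a &&& 15 < 16 ∧ (a &&& 16 = 0 ∨ a &&& 16 = 16) := by decide
set_option maxRecDepth 8192 in
theorem split8 : ∀ a, a < 16 → a = (a &&& 8) ^^^ (a &&& 7) ∧ a &&& 7 < 8 ∧ (a &&& 8 = 0 ∨ a &&& 8 = 8) := by decide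
set_option maxRecDepth 8192 in
theorem split4 : ∀ a, a < 8 → a = (a &&& 4) ^^^ (a &&& 3) ∧ a &&& 3 < 4 ∧ (a &&& 4 = 0 ∨ a &&& 4 = 4) := by decide
set_option maxRecDepth 8192 in
theorem split2 : ∀ a, a < 4 → a = (a &&& 2) ^^^ (a &&& 1) ∧ a &&& 1 < 2 ∧ (a &&& 2 = 0 ∨ a &&& 2 = 2) := by decide

-- xor-linear maps agreeing on the bits 1,2,…,128 agree on all bytes
theorem lift8 (L R : Nat → Nat)
    (hL : ∀ x y, L (x ^^^ y) = L x ^^^ L y) (hR : ∀ x y, R (x ^^^ y) = R x ^^^ R y)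
    (h1 : L 1 = R 1) (h2 : L 2 = R 2) (h4 : L 4 = R 4) (h8 : L 8 = R 8)
    (h16 : L 16 = R 16) (h32 : L 32 = R 32) (h64 : L 64 = R 64) (h128 : L 128 = R 128) :
    ∀ a, a < 256 → L a = R a := by
  have hz : L 0 = R 0 := by rw [lin_zero L hL, lin_zero R hR]
  have step : ∀ (p : Nat), L p = R p → ∀ (lo : Nat → Prop),
      (∀ a, lo a → L a = R a) →
      ∀ hi low : Nat, (hi = 0 ∨ hi = p) → lo low → L (hi ^^^ low) = R (hi ^^^ low) := by
    intro p hp lo IH hi low hhi hlow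
    rw [hL, hR]
    rcases hhi with h | h <;> rw [h]
    · rw [hz, IH _ hlow]
    · rw [hp, IH _ hlow]
  have P1 : ∀ a, a < 2 → L a = R a := by
    intro a ha
    interval_cases a
    · exact hz
    · exact h1
  have P2 : ∀ a, a < 4 → L a = R a := by
    intro a ha
    obtain ⟨e, hlt, hd⟩ := split2 a ha
    rw [e]; exact step 2 h2 (· < 2) P1 _ _ hd hlt
  have P3 : ∀ a, a < 8 → L a = R a := by
    intro a ha
    obtain ⟨e, hlt, hd⟩ := split4 a ha
    rw [e]; exact step 4 h4 (· < 4) P2 _ _ hd hlt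
  have P4 : ∀ a, a < 16 → L a = R a := by
    intro a ha
    obtain ⟨e, hlt, hd⟩ := split8 a ha
    rw [e]; exact step 8 h8 (· < 8) P3 _ _ hd hlt
  have P5 : ∀ a, a < 32 → L a = R a := by
    intro a ha
    obtain ⟨e, hlt, hd⟩ := split16 a ha
    rw [e]; exact step 16 h16 (· < 16) P4 _ _ hd hlt
  have P6 : ∀ a, a < 64 → L a = R a := by
    intro a ha
    obtain ⟨e, hlt, hd⟩ := split32 a ha
    rw [e]; exact step 32 h32 (· < 32) P5 _ _ hd hlt
  have P7 : ∀ a, a < 128 → L a = R a := by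
    intro a ha
    obtain ⟨e, hlt, hd⟩ := split64 a ha
    rw [e]; exact step 64 h64 (· < 64) P6 _ _ hd hlt
  intro a ha
  obtain ⟨e, hlt, hd⟩ := split128 a ha
  rw [e]; exact step 128 h128 (· < 128) P7 _ _ hd hlt

-- commutativity and associativity on bytes, from bilinearity plus basis checks
theorem comm_basis : ∀ x ∈ [1,2,4,8,16,32,64,128], ∀ y ∈ [1,2,4,8,16,32,64,128], mulN x y = mulN y x := by decide

theorem comm_pow (x : Nat) (hx : x ∈ [1,2,4,8,16,32,64,128]) :
    ∀ b, b < 256 → mulN x b = mulN b x := by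
  refine lift8 (fun b => mulN x b) (fun b => mulN b x)
    (fun u v => mulN_linR x u v) (fun u v => mulN_linL u v x) ?_ ?_ ?_ ?_ ?_ ?_ ?_ ?_ <;>
    exact comm_basis x hx _ (by decide)

theorem mulN_comm (a b : Nat) (ha : a < 256) (hb : b < 256) : mulN a b = mulN b a := by
  refine lift8 (fun a => mulN a b) (fun a => mulN b a)
    (fun u v => mulN_linL u v b) (fun u v => mulN_linR b u v) ?_ ?_ ?_ ?_ ?_ ?_ ?_ ?_ a ha <;>
    exact comm_pow _ (by decide) b hb

theorem assoc_basis : ∀ x ∈ [1,2,4,8,16,32,64,128], ∀ y ∈ [1,2,4,8,16,32,64,128], ∀ z ∈ [1,2,4,8,16,32,64,128], mulN (mulN x y) z = mulN x (mulN y z) := by decide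

theorem assoc_pow2 (x y : Nat) (hx : x ∈ [1,2,4,8,16,32,64,128]) (hy : y ∈ [1,2,4,8,16,32,64,128]) :
    ∀ c, c < 256 → mulN (mulN x y) c = mulN x (mulN y c) := by
  refine lift8 (fun c => mulN (mulN x y) c) (fun c => mulN x (mulN y c))
    (fun u v => mulN_linR _ u v)
    (fun u v => by show mulN x (mulN y (u ^^^ v)) = mulN x (mulN y u) ^^^ mulN x (mulN y v)
                   rw [mulN_linR y u v, mulN_linR x]) ?_ ?_ ?_ ?_ ?_ ?_ ?_ ?_ <;>
    exact assoc_basis x hx y hy _ (by decide)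

theorem assoc_pow1 (x : Nat) (hx : x ∈ [1,2,4,8,16,32,64,128]) (c : Nat) (hc : c < 256) :
    ∀ b, b < 256 → mulN (mulN x b) c = mulN x (mulN b c) := by
  refine lift8 (fun b => mulN (mulN x b) c) (fun b => mulN x (mulN b c))
    (fun u v => by show mulN (mulN x (u ^^^ v)) c = mulN (mulN x u) c ^^^ mulN (mulN x v) c
                   rw [mulN_linR x u v, mulN_linL])
    (fun u v => by show mulN x (mulN (u ^^^ v) c) = mulN x (mulN u c) ^^^ mulN x (mulN v c)
                   rw [mulN_linL u v c, mulN_linR x]) ?_ ?_ ?_ ?_ ?_ ?_ ?_ ?_ <;>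
    exact assoc_pow2 x _ hx (by decide) c hc

theorem mulN_assoc (a b c : Nat) (ha : a < 256) (hb : b < 256) (hc : c < 256) :
    mulN (mulN a b) c = mulN a (mulN b c) := by
  refine lift8 (fun a => mulN (mulN a b) c) (fun a => mulN a (mulN b c))
    (fun u v => by show mulN (mulN (u ^^^ v) b) c = mulN (mulN u b) c ^^^ mulN (mulN v b) c
                   rw [mulN_linL u v b, mulN_linL])
    (fun u v => mulN_linL u v _) ?_ ?_ ?_ ?_ ?_ ?_ ?_ ?_ a ha <;>
    exact assoc_pow1 _ (by decide) c hc b hb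

-- small exhaustive facts
set_option maxRecDepth 8192 in
theorem mulN_one_left : ∀ b, b < 256 → mulN 1 b = b := by decide
set_option maxRecDepth 8192 in
theorem mulN_zero_left : ∀ b, b < 256 → mulN 0 b = 0 := by decide
theorem invN_zero : invN 0 = 0 := by decide
set_option maxRecDepth 8192 in
theorem invN_mul_self : ∀ a, a < 256 → a ≠ 0 → mulN (invN a) a = 1 := by decide
theorem one_invN_one : mulN 1 (invN 1) = 1 := by decide

theorem invN_lt (a : Nat) : invN a < 256 := mulN_lt _ _

theorem mulN_one_right (a : Nat) (ha : a < 256) : mulN a 1 = a := by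
  rw [mulN_comm a 1 ha (by omega), mulN_one_left a ha]

theorem mulN_zero_right (a : Nat) (ha : a < 256) : mulN a 0 = 0 := by
  rw [mulN_comm a 0 ha (by omega), mulN_zero_left a ha]

theorem mulN_self_inv (a : Nat) (ha : a < 256) (h0 : a ≠ 0) : mulN a (invN a) = 1 := by
  rw [mulN_comm a (invN a) ha (invN_lt a), invN_mul_self a ha h0]

theorem mulN_ne_zero (d e : Nat) (hd : d < 256) (he : e < 256) (hd0 : d ≠ 0) (he0 : e ≠ 0) :
    mulN d e ≠ 0 := by
  intro h
  have h1 : mulN (mulN d e) (mulN (invN e) (invN d)) = 1 := by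
    rw [mulN_assoc d e _ hd he (mulN_lt _ _), ← mulN_assoc e (invN e) (invN d) he (invN_lt e) (invN_lt d)]
    rw [mulN_self_inv e he he0, mulN_one_left (invN d) (invN_lt d), mulN_self_inv d hd hd0]
  rw [h, mulN_zero_left _ (mulN_lt _ _)] at h1
  exact absurd h1 (by omega)

theorem invN_mulN (d e : Nat) (hd : d < 256) (he : e < 256) :
    invN (mulN d e) = mulN (invN d) (invN e) := by
  by_cases hd0 : d = 0
  · subst hd0
    rw [mulN_zero_left e he, invN_zero, mulN_zero_left _ (invN_lt e)]
  by_cases he0 : e = 0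
  · subst he0
    rw [mulN_zero_right d hd, invN_zero, mulN_zero_right _ (invN_lt d)]
  have hde : mulN d e ≠ 0 := mulN_ne_zero d e hd he hd0 he0
  -- both invN (d·e) and invN d · invN e are inverses of d·e; inverses are unique
  have hA : mulN (invN (mulN d e)) (mulN d e) = 1 := invN_mul_self _ (mulN_lt d e) hde
  have hB : mulN (mulN (invN d) (invN e)) (mulN d e) = 1 := by
    rw [mulN_assoc (invN d) (invN e) _ (invN_lt d) (invN_lt e) (mulN_lt d e),
        mulN_comm d e hd he,
        ← mulN_assoc (invN e) e d (invN_lt e) he hd,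
        invN_mul_self e he he0, mulN_one_left d hd,
        invN_mul_self d hd hd0]
  have uniq : ∀ u v X : Nat, u < 256 → v < 256 → X < 256 →
      mulN u X = 1 → mulN v X = 1 → u = v := by
    intro u v X hu hv hX h3 h4
    have hXv : mulN X v = 1 := by rw [mulN_comm X v hX hv]; exact h4
    calc u = mulN u 1 := (mulN_one_right u hu).symm
      _ = mulN u (mulN X v) := by rw [hXv]
      _ = mulN (mulN u X) v := (mulN_assoc u X v hu hX hv).symm
      _ = mulN 1 v := by rw [h3]
      _ = v := mulN_one_left v hv
  exact uniq _ _ _ (invN_lt _) (mulN_lt _ _) (mulN_lt d e) hA hB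

-- the key rebalancing identity: (n/d)·(x/e) = (n·x)/(d·e) on bytes
theorem keyIdent (n d x e : Nat) (hn : n < 256) (hd : d < 256) (hx : x < 256) (he : e < 256) :
    mulN (mulN n (invN d)) (mulN x (invN e)) = mulN (mulN n x) (invN (mulN d e)) := by
  rw [invN_mulN d e hd he]
  have hid := invN_lt d
  have hie := invN_lt e
  rw [mulN_assoc n (invN d) _ hn hid (mulN_lt _ _),
      ← mulN_assoc (invN d) x (invN e) hid hx hie,
      mulN_comm (invN d) x hid hx,
      mulN_assoc x (invN d) (invN e) hx hid hie,
      ← mulN_assoc n x _ hn hx (mulN_lt _ _)]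

-- ===== bridges between the Int-level ports and the Nat-level view =====

theorem toByte_lt (a : Int) : toByte a < 256 := by
  rcases a with n | n <;>
    simp [toByte, PySem.Int.band]
  · have := Nat.and_le_right (n := n) (m := 255); omega
  · omega

theorem toByte_cast (m : Nat) (hm : m < 256) : toByte (m : Int) = m := by
  simp [toByte, PySem.Int.band]
  exact mask_lt m hm

theorem mul_bridge (a b : Int) : gf256_mul a b = ((mulN (toByte a) (toByte b) : Nat) : Int) := by
  have h : gf256_mul a b = ((gmLoop 8 (toByte b) (toByte a) 0 : Nat) : Int) := rfl
  rw [h]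
  unfold mulN
  rw [mask_lt _ (toByte_lt a), mask_lt _ (toByte_lt b)]

theorem chain_bridge (a : Int) (L : List Nat) :
    ∀ r : Nat, r < 256 →
      L.foldl (fun r _ => gf256_mul (gf256_mul r r) a) ((r : Nat) : Int)
        = ((L.foldl (fun r _ => mulN (mulN r r) (toByte a)) r : Nat) : Int) := by
  induction L with
  | nil => intro r _; rfl
  | cons hd tl ih =>
    intro r hr
    simp only [List.foldl_cons]
    rw [mul_bridge (r : Int) (r : Int), toByte_cast r hr, mul_bridge, toByte_cast _ (mulN_lt r r)]
    exact ih _ (mulN_lt _ _)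

theorem chain_lt (t : Nat) (L : List Nat) : ∀ r : Nat, r < 256 →
    L.foldl (fun r _ => mulN (mulN r r) t) r < 256 := by
  induction L with
  | nil => intro r hr; simpa using hr
  | cons hd tl ih => intro r _; exact ih _ (mulN_lt _ _)

theorem inv_bridge (a : Int) : gf256_inv a = if a = 0 then 0 else ((invN (toByte a) : Nat) : Int) := by
  by_cases h : a = 0
  · simp [gf256_inv, h]
  · rw [if_neg h]
    unfold gf256_inv invN
    rw [if_neg h]
    have hr : List.range 6 = 0 :: [1,2,3,4,5] := by rfl
    have e1 : (List.range 6).foldl (fun r _ => gf256_mul (gf256_mul r r) a) a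
        = (((List.range 6).foldl (fun r _ => mulN (mulN r r) (toByte a)) (toByte a) : Nat) : Int) := by
      have e0 : (List.range 6).foldl (fun r _ => gf256_mul (gf256_mul r r) a) a
          = List.foldl (fun r _ => gf256_mul (gf256_mul r r) a)
              (((mulN (mulN (toByte a) (toByte a)) (toByte a) : Nat) : Int)) [1,2,3,4,5] := by
        rw [hr, List.foldl_cons, mul_bridge a a, mul_bridge, toByte_cast _ (mulN_lt _ _)]
      rw [e0, chain_bridge a [1,2,3,4,5] _ (mulN_lt _ _), hr]
      rfl
    show gf256_mul ((List.range 6).foldl (fun r _ => gf256_mul (gf256_mul r r) a) a)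
          ((List.range 6).foldl (fun r _ => gf256_mul (gf256_mul r r) a) a)
        = ((mulN ((List.range 6).foldl (fun r _ => mulN (mulN r r) (toByte a)) (toByte a))
                 ((List.range 6).foldl (fun r _ => mulN (mulN r r) (toByte a)) (toByte a)) : Nat) : Int)
    rw [e1, mul_bridge, toByte_cast _ (chain_lt _ _ _ (toByte_lt a))]

theorem inv_bridge' (a : Int) : gf256_inv a = ((invN (toByte a) : Nat) : Int) := by
  rw [inv_bridge]
  by_cases h : a = 0
  · rw [if_pos h, h]
    have h0 : toByte (0 : Int) = 0 := by decide
    rw [h0, invN_zero]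
    rfl
  · rw [if_neg h]

-- ===== step lemmas for the two loops =====

theorem lagA_skip (xj y : Int) (rest : List (Int × Int)) (j i xi r : Int) (hij : ¬ i ≠ j) :
    lagA ((xj, y) :: rest) j i xi r = lagA rest (j+1) i xi r := by
  simp only [lagA]
  rw [if_neg hij]

theorem lagA_step (xj y : Int) (rest : List (Int × Int)) (j i xi r : Int) (hij : i ≠ j)
    (hd : PySem.Int.bxor xi xj ≠ 0) :
    lagA ((xj, y) :: rest) j i xi r
      = lagA rest (j+1) i xi (gf256_mul r (gf256_mul xj (gf256_inv (PySem.Int.bxor xi xj)))) := by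
  simp only [lagA]
  rw [if_pos hij, if_neg hd]
  have hdiv : gf256_div xj (PySem.Int.bxor xi xj)
      = some (gf256_mul xj (gf256_inv (PySem.Int.bxor xi xj))) := by
    simp [gf256_div, hd]
  rw [hdiv]

theorem lagA_none (xj y : Int) (rest : List (Int × Int)) (j i xi r : Int) (hij : i ≠ j)
    (hd : PySem.Int.bxor xi xj = 0) :
    lagA ((xj, y) :: rest) j i xi r = none := by
  simp only [lagA]
  rw [if_pos hij, if_pos hd]

theorem lagB_skip (xj y : Int) (rest : List (Int × Int)) (j i xi num den : Int) (hij : i = j) :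
    lagB ((xj, y) :: rest) j i xi num den = lagB rest (j+1) i xi num den := by
  simp only [lagB]
  rw [if_pos hij]

theorem lagB_step (xj y : Int) (rest : List (Int × Int)) (j i xi num den : Int) (hij : ¬ i = j)
    (hd : PySem.Int.bxor xi xj ≠ 0) :
    lagB ((xj, y) :: rest) j i xi num den
      = lagB rest (j+1) i xi (gf256_mul num xj) (gf256_mul den (PySem.Int.bxor xi xj)) := by
  simp only [lagB]
  rw [if_neg hij, if_neg hd]

theorem lagB_none (xj y : Int) (rest : List (Int × Int)) (j i xi num den : Int) (hij : ¬ i = j)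
    (hd : PySem.Int.bxor xi xj = 0) :
    lagB ((xj, y) :: rest) j i xi num den = none := by
  simp only [lagB]
  rw [if_neg hij, if_pos hd]

-- ===== the main loop correspondence =====

theorem main_loop (shares : List (Int × Int)) :
    ∀ (j i xi : Int) (num den : Nat), num < 256 → den < 256 →
      lagA shares j i xi ((mulN num (invN den) : Nat) : Int)
        = lagB shares j i xi (num : Int) (den : Int) := by
  induction shares with
  | nil =>
    intro j i xi num den hnum hden
    show some _ = some _
    rw [mul_bridge, toByte_cast _ hnum, inv_bridge', toByte_cast _ hden,
        toByte_cast _ (invN_lt _)]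
  | cons hd tl ih =>
    intro j i xi num den hnum hden
    obtain ⟨xj, y⟩ := hd
    by_cases hij : i = j
    · rw [lagA_skip _ _ _ _ _ _ _ (by simp [hij]), lagB_skip _ _ _ _ _ _ _ _ hij]
      exact ih _ _ _ _ _ hnum hden
    · by_cases hden0 : PySem.Int.bxor xi xj = 0
      · rw [lagA_none _ _ _ _ _ _ _ hij hden0, lagB_none _ _ _ _ _ _ _ _ hij hden0]
      · rw [lagA_step _ _ _ _ _ _ _ hij hden0, lagB_step _ _ _ _ _ _ _ _ hij hden0]
        set e := toByte (PySem.Int.bxor xi xj) with he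
        set xB := toByte xj with hxB
        have h1 : gf256_mul xj (gf256_inv (PySem.Int.bxor xi xj))
            = ((mulN xB (invN e) : Nat) : Int) := by
          rw [inv_bridge', mul_bridge, toByte_cast _ (invN_lt _)]
        have h2 : gf256_mul ((mulN num (invN den) : Nat) : Int) ((mulN xB (invN e) : Nat) : Int)
            = ((mulN (mulN num (invN den)) (mulN xB (invN e)) : Nat) : Int) := by
          rw [mul_bridge, toByte_cast _ (mulN_lt _ _), toByte_cast _ (mulN_lt _ _)]
        have h3 : gf256_mul (num : Int) xj = ((mulN num xB : Nat) : Int) := by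
          rw [mul_bridge, toByte_cast _ hnum]
        have h4 : gf256_mul (den : Int) (PySem.Int.bxor xi xj) = ((mulN den e : Nat) : Int) := by
          rw [mul_bridge, toByte_cast _ hden]
        rw [h1, h2, h3, h4,
          keyIdent num den xB e hnum hden (toByte_lt _) (toByte_lt _)]
        exact ih _ _ _ _ _ (mulN_lt _ _) (mulN_lt _ _)

-- ===== VERDICT (by name: the statement is the Claim_ definition above) =====
theorem lagrange_basis_at_zero_py_spec : Claim_equal_lagrange_basis_at_zero_py := by
  intro shares i xi _
  unfold Spec_lagrange_basis_at_zero_py lagrange_basis_at_zero_py lagrange_basis_at_zero_py_alt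
  have h := main_loop shares 0 i xi 1 1 (by omega) (by omega)
  rw [one_invN_one] at h
  simpa using h
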